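-- pv_equiv track=rewrite | github.com/gavieeen/simulations | CS_374/test3.py | precompute_validity
-- ===== SOURCE A (Python) =====
-- def precompute_validity(M):
--     n = len(M)
--     m = len(M[0]) if n > 0 else 0
--     # Initialize 4D boolean array for validity of sub-rectangles
--     valid = [
--         [[[False for _ in range(m)] for _ in range(n)] for _ in range(m)]
--         for _ in range(n)
--     ]
--
--     # Single-cell sub-rectangles are always valid
--     for i in range(n):
--         for j in range(m):
--             valid[i][j][i][j] = True
--
--     # Check larger sub-rectangles for uniformity
--     for i in range(n):
--         for j in range(m):
--             for k in range(i, n):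
--                 for l in range(j, m):
--                     if (l > j and valid[i][j][k][l - 1] and M[k][l] == M[i][j]) or (
--                         k > i and valid[i][j][k - 1][l] and M[k][l] == M[i][j]
--                     ):
--                         valid[i][j][k][l] = True
--
--     return valid
-- ===== SOURCE B (Python) =====
-- def precompute_validity(M):
--     # Per-source breadth-first search: valid[i][j][k][l] is True iff a monotone
--     # right/down path of cells equal to M[i][j] reaches (k, l) from (i, j), so
--     # for each source we explore that graph level by level with a frontier and
--     # a set of seen coordinates, then materialize the 2D boolean table.
--     n = len(M)
--     m = len(M[0]) if n > 0 else 0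
--     out = []
--     for i in range(n):
--         row = []
--         for j in range(m):
--             v = M[i][j]
--             seen = {(i, j)}
--             frontier = [(i, j)]
--             while frontier:
--                 nxt = []
--                 for r, c in frontier:
--                     for nr, nc in ((r, c + 1), (r + 1, c)):
--                         if nr < n and nc < m and (nr, nc) not in seen and M[nr][nc] == v:
--                             seen.add((nr, nc))
--                             nxt.append((nr, nc))
--                 frontier = nxt
--             row.append([[(r, c) in seen for c in range(m)] for r in range(n)])
--         out.append(row)
--     return out
-- ===== Notes on version B (the rewrite author's own statement) =====
-- stated objective: alternative
-- what changed: A fills a shared 4D DP table in index order, re-reading left/up entries; B treats each source cell as the root of a graph search and runs a level-by-level BFS with a frontier list and a set of seen coordinates over right/down moves between equal-valued cells, then materializes each 2D table from the seen set.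
import Mathlib
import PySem

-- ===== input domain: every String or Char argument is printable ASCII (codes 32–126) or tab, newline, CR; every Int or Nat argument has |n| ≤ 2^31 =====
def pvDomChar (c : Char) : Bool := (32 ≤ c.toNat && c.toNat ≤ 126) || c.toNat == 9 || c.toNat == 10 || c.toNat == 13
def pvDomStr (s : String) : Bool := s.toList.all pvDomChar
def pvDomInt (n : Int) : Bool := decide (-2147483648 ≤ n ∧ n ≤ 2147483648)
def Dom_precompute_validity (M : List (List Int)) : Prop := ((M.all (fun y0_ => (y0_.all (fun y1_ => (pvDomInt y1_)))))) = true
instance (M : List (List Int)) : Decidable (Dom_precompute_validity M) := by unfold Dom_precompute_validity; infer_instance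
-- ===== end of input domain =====

-- B replaces A's shared mutable 4D DP table with a per-source level-by-level BFS
-- over right/down moves between equal-valued cells (frontier list + seen set);
-- same asymptotic cost, a genuinely different algorithm.

-- ===== PORT A =====
-- M[k][l] (all reads the loops perform are in range on Pre_)
def pvMget (M : List (List Int)) (k l : Nat) : Int := (M.getD k []).getD l 0

-- Python's 4D list is ported as concrete nested lists; reads/writes via getD/modify.
def pvGet4 (v : List (List (List (List Bool)))) (a b c d : Nat) : Bool :=
  (((v.getD a []).getD b []).getD c []).getD d false

def pvSet4 (v : List (List (List (List Bool)))) (i j k l : Nat) (bv : Bool) :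
    List (List (List (List Bool))) :=
  v.modify i (fun vi => vi.modify j (fun vij => vij.modify k (fun vijk => vijk.set l bv)))

-- body of A's innermost loop: the two-disjunct test, then the conditional write
def pvCellL (M : List (List Int)) (i j k l : Nat) (v : List (List (List (List Bool)))) :
    List (List (List (List Bool))) :=
  if ((decide (j < l) && pvGet4 v i j k (l - 1) && decide (pvMget M k l = pvMget M i j))
      || (decide (i < k) && pvGet4 v i j (k - 1) l && decide (pvMget M k l = pvMget M i j))) = true
  then pvSet4 v i j k l true else v

-- for l in range(j, m)
def pvRowL (M : List (List Int)) (m i j k : Nat) (v : List (List (List (List Bool)))) :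
    List (List (List (List Bool))) :=
  (List.range' j (m - j)).foldl (fun v l => pvCellL M i j k l v) v

-- for k in range(i, n)
def pvBlockL (M : List (List Int)) (n m i j : Nat) (v : List (List (List (List Bool)))) :
    List (List (List (List Bool))) :=
  (List.range' i (n - i)).foldl (fun v k => pvRowL M m i j k v) v

-- first double loop: valid[i][j][i][j] = True
def pvDiagJL (i m : Nat) (v : List (List (List (List Bool)))) : List (List (List (List Bool))) :=
  (List.range m).foldl (fun v j => pvSet4 v i j i j true) v

def pvDiagIL (n m : Nat) (v : List (List (List (List Bool)))) : List (List (List (List Bool))) :=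
  (List.range n).foldl (fun v i => pvDiagJL i m v) v

-- second quadruple loop
def pvMainL (M : List (List Int)) (n m : Nat) (v : List (List (List (List Bool)))) :
    List (List (List (List Bool))) :=
  (List.range n).foldl (fun v i => (List.range m).foldl (fun v j => pvBlockL M n m i j v) v) v

def precompute_validity (M : List (List Int)) : List (List (List (List Bool))) :=
  let n := M.length
  let m := if 0 < n then (M.headD []).length else 0
  -- 4D array of False
  let v0 : List (List (List (List Bool))) :=
    (List.range n).map fun _ => (List.range m).map fun _ =>
      (List.range n).map fun _ => (List.range m).map fun _ => false
  pvMainL M n m (pvDiagIL n m v0)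

-- ===== PORT B =====
-- the body of B's innermost 'if': in bounds, not yet seen and equal ⟹ mark and enqueue
def pvVisit (M : List (List Int)) (n m : Nat) (v : Int)
    (st : List (Nat × Nat) × List (Nat × Nat)) (q : Nat × Nat) :
    List (Nat × Nat) × List (Nat × Nat) :=
  if q.1 < n ∧ q.2 < m ∧ ¬(q ∈ st.1) ∧ pvMget M q.1 q.2 = v then
    (st.1 ++ [q], st.2 ++ [q])
  else st

-- "for r, c in frontier: for nr, nc in ((r, c + 1), (r + 1, c)): ..." building nxt
def pvLevel (M : List (List Int)) (n m : Nat) (v : Int)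
    (seen frontier : List (Nat × Nat)) : List (Nat × Nat) × List (Nat × Nat) :=
  frontier.foldl (fun st rc =>
    pvVisit M n m v (pvVisit M n m v st (rc.1, rc.2 + 1)) (rc.1 + 1, rc.2)) (seen, [])

-- "while frontier:" — fuel n*m+1 bounds the rounds: every round with a nonempty
-- frontier was fed by at least one newly seen cell, and seen never exceeds n*m cells
def pvBFS (M : List (List Int)) (n m : Nat) (v : Int) :
    Nat → List (Nat × Nat) → List (Nat × Nat) → List (Nat × Nat)
  | 0, seen, _ => seen
  | fuel + 1, seen, frontier =>
    if frontier.isEmpty then seen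
    else pvBFS M n m v fuel (pvLevel M n m v seen frontier).1 (pvLevel M n m v seen frontier).2

def precompute_validity_alt (M : List (List Int)) : List (List (List (List Bool))) :=
  let n := M.length
  let m := if 0 < n then (M.headD []).length else 0
  (List.range n).map fun i => (List.range m).map fun j =>
    let seen := pvBFS M n m (pvMget M i j) (n * m + 1) [(i, j)] [(i, j)]
    (List.range n).map fun r => (List.range m).map fun c => seen.contains (r, c)

-- ===== PRECONDITION & SPEC =====
-- Pre_ excludes exactly the ragged inputs on which Python A raises IndexError
-- (some row shorter than the first row); B raises there as well.
def Pre_precompute_validity (M : List (List Int)) : Prop :=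
  ∀ row ∈ M, (M.headD []).length ≤ row.length
instance (M : List (List Int)) : Decidable (Pre_precompute_validity M) := by
  unfold Pre_precompute_validity; infer_instance

def pvWitness_precompute_validity : List (List Int) := [[1, 1], [1, 2]]

def Spec_precompute_validity (M : List (List Int)) (out : List (List (List (List Bool)))) : Prop := out = precompute_validity_alt M
instance (M : List (List Int)) (out : List (List (List (List Bool)))) : Decidable (Spec_precompute_validity M out) := by unfold Spec_precompute_validity; infer_instance

-- ===== CLAIM (what is proved, stated in full; the proofs are below) =====
def Claim_equal_precompute_validity : Prop := ∀ (M : List (List Int)), Dom_precompute_validity M → Pre_precompute_validity M → Spec_precompute_validity M (precompute_validity M)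

-- ===== LEMMAS AND PROOFS =====

-- the common mathematical value: a monotone equal-valued path from (i,j) reaches (k,l)
def pvV (M : List (List Int)) (i j : Nat) : Nat → Nat → Bool
  | k, l =>
    if k < i ∨ l < j then false
    else if k = i ∧ l = j then true
    else (decide (pvMget M k l = pvMget M i j)) &&
      ((if h : j < l then pvV M i j k (l - 1) else false) ||
       (if h : i < k then pvV M i j (k - 1) l else false))
termination_by k l => k + l
decreasing_by all_goals omega

theorem pvV_lt {M : List (List Int)} {i j k l : Nat} (h : k < i ∨ l < j) :
    pvV M i j k l = false := by
  rw [pvV]; rw [if_pos h]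

theorem pvV_src (M : List (List Int)) (i j : Nat) : pvV M i j i j = true := by
  rw [pvV]; rw [if_neg (by omega), if_pos ⟨rfl, rfl⟩]

theorem pvV_step {M : List (List Int)} {i j k l : Nat} (hik : i ≤ k) (hjl : j ≤ l)
    (hnot : ¬(k = i ∧ l = j)) :
    pvV M i j k l =
      ((decide (j < l) && pvV M i j k (l - 1) && (decide (pvMget M k l = pvMget M i j)))
        || (decide (i < k) && pvV M i j (k - 1) l && (decide (pvMget M k l = pvMget M i j)))) := by
  rw [pvV]
  rw [if_neg (by omega), if_neg hnot]
  by_cases h1 : j < l <;> by_cases h2 : i < k <;>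
    simp only [h1, h2, dif_pos, dif_neg, not_false_iff, decide_true, decide_false,
      Bool.true_and, Bool.false_and, Bool.or_false, Bool.false_or, Bool.and_false] <;>
    first
      | (rw [Bool.and_comm, Bool.and_or_distrib_right])
      | (rw [Bool.and_comm])

-- ---------- A side: the 4D array modeled as a total function on indices ----------
-- point update of the function model
def pvUpd (g : Nat → Nat → Nat → Nat → Bool) (i j k l : Nat) (bv : Bool) :
    Nat → Nat → Nat → Nat → Bool :=
  fun a b c d => if a = i ∧ b = j ∧ c = k ∧ d = l then bv else g a b c d

-- body of A's innermost loop: the two-disjunct test, then the conditional write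
def pvCell (M : List (List Int)) (i j k l : Nat) (g : Nat → Nat → Nat → Nat → Bool) :
    Nat → Nat → Nat → Nat → Bool :=
  if ((decide (j < l) && g i j k (l - 1) && (decide (pvMget M k l = pvMget M i j)))
      || (decide (i < k) && g i j (k - 1) l && (decide (pvMget M k l = pvMget M i j)))) = true
  then pvUpd g i j k l true else g

-- for l in range(j, m)
def pvRowA (M : List (List Int)) (m i j k : Nat) (g : Nat → Nat → Nat → Nat → Bool) :
    Nat → Nat → Nat → Nat → Bool :=
  (List.range' j (m - j)).foldl (fun g l => pvCell M i j k l g) g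

-- for k in range(i, n)
def pvBlockA (M : List (List Int)) (n m i j : Nat) (g : Nat → Nat → Nat → Nat → Bool) :
    Nat → Nat → Nat → Nat → Bool :=
  (List.range' i (n - i)).foldl (fun g k => pvRowA M m i j k g) g

-- first double loop: valid[i][j][i][j] = True
def pvDiagJ (i m : Nat) (g : Nat → Nat → Nat → Nat → Bool) : Nat → Nat → Nat → Nat → Bool :=
  (List.range m).foldl (fun g j => pvUpd g i j i j true) g

def pvDiagI (n m : Nat) (g : Nat → Nat → Nat → Nat → Bool) : Nat → Nat → Nat → Nat → Bool :=
  (List.range n).foldl (fun g i => pvDiagJ i m g) g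

-- second quadruple loop
def pvMain (M : List (List Int)) (n m : Nat) (g : Nat → Nat → Nat → Nat → Bool) :
    Nat → Nat → Nat → Nat → Bool :=
  (List.range n).foldl (fun g i => (List.range m).foldl (fun g j => pvBlockA M n m i j g) g) g



theorem pvDiagJ_eval (i m : Nat) (g : Nat → Nat → Nat → Nat → Bool) (a b c d : Nat) :
    pvDiagJ i m g a b c d = if a = i ∧ b < m ∧ c = i ∧ d = b then true else g a b c d := by
  induction m generalizing g with
  | zero => simp [pvDiagJ]
  | succ m ih =>
    unfold pvDiagJ
    rw [List.range_succ, List.foldl_append]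
    show pvUpd (pvDiagJ i m g) i m i m true a b c d = _
    unfold pvUpd
    rw [ih]
    split_ifs <;> first | rfl | omega

theorem pvDiagI_eval (n m : Nat) (a b c d : Nat) :
    pvDiagI n m (fun _ _ _ _ => false) a b c d
      = if a < n ∧ b < m ∧ c = a ∧ d = b then true else false := by
  induction n with
  | zero => simp [pvDiagI]
  | succ n ih =>
    unfold pvDiagI at ih ⊢
    rw [List.range_succ, List.foldl_append, List.foldl_cons, List.foldl_nil, pvDiagJ_eval, ih]
    split_ifs <;> first | rfl | omega

theorem pvCell_local {M i j k l g a b c d} (h : ¬(a = i ∧ b = j)) :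
    pvCell M i j k l g a b c d = g a b c d := by
  unfold pvCell
  split
  · unfold pvUpd; rw [if_neg (by tauto)]
  · rfl

theorem foldl_cell_local {M i j k a b c d} (h : ¬(a = i ∧ b = j)) :
    ∀ (L : List Nat) (g), (L.foldl (fun g l => pvCell M i j k l g) g) a b c d = g a b c d := by
  intro L
  induction L with
  | nil => intro g; rfl
  | cons x L ih => intro g; rw [List.foldl_cons, ih]; exact pvCell_local h

theorem pvRowA_local {M m i j k g a b c d} (h : ¬(a = i ∧ b = j)) :
    pvRowA M m i j k g a b c d = g a b c d := foldl_cell_local h _ _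

theorem pvBlockA_local {M n m i j g a b c d} (h : ¬(a = i ∧ b = j)) :
    pvBlockA M n m i j g a b c d = g a b c d := by
  unfold pvBlockA
  generalize List.range' i (n - i) = L
  induction L generalizing g with
  | nil => rfl
  | cons x L ih => rw [List.foldl_cons, ih]; exact pvRowA_local h

theorem pvCell_cong {M i j k l} {g g' : Nat → Nat → Nat → Nat → Bool}
    (hg : ∀ c d, g i j c d = g' i j c d) :
    ∀ c d, pvCell M i j k l g i j c d = pvCell M i j k l g' i j c d := by
  intro c d
  unfold pvCell
  rw [hg k (l - 1), hg (k - 1) l]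
  split
  · unfold pvUpd; split
    · rfl
    · exact hg c d
  · exact hg c d

theorem pvRowA_cong {M m i j k} {g g' : Nat → Nat → Nat → Nat → Bool}
    (hg : ∀ c d, g i j c d = g' i j c d) :
    ∀ c d, pvRowA M m i j k g i j c d = pvRowA M m i j k g' i j c d := by
  unfold pvRowA
  generalize List.range' j (m - j) = L
  induction L generalizing g g' with
  | nil => exact hg
  | cons x L ih =>
    rw [List.foldl_cons, List.foldl_cons]
    exact ih (pvCell_cong hg)

theorem pvBlockA_cong {M n m i j} {g g' : Nat → Nat → Nat → Nat → Bool}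
    (hg : ∀ c d, g i j c d = g' i j c d) :
    ∀ c d, pvBlockA M n m i j g i j c d = pvBlockA M n m i j g' i j c d := by
  unfold pvBlockA
  generalize List.range' i (n - i) = L
  induction L generalizing g g' with
  | nil => exact hg
  | cons x L ih =>
    rw [List.foldl_cons, List.foldl_cons]
    exact ih (pvRowA_cong hg)

theorem pvUpd_apply (g : Nat → Nat → Nat → Nat → Bool) (i j k l : Nat) (bv : Bool)
    (a b c d : Nat) :
    pvUpd g i j k l bv a b c d = if a = i ∧ b = j ∧ c = k ∧ d = l then bv else g a b c d := rfl

theorem pvCell_apply (M : List (List Int)) (i j k l : Nat) (g : Nat → Nat → Nat → Nat → Bool)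
    (a b c d : Nat) :
    pvCell M i j k l g a b c d =
      if ((decide (j < l) && g i j k (l - 1) && (decide (pvMget M k l = pvMget M i j)))
          || (decide (i < k) && g i j (k - 1) l && (decide (pvMget M k l = pvMget M i j)))) = true
      then pvUpd g i j k l true a b c d else g a b c d := by
  unfold pvCell
  exact apply_ite (fun F : Nat → Nat → Nat → Nat → Bool => F a b c d) _ _ _

-- row evaluation
theorem pvRowA_eval {M : List (List Int)} {m i j : Nat} (k : Nat)
    (hik : i ≤ k) (hjm : j < m)
    {g : Nat → Nat → Nat → Nat → Bool}
    (hprev : ∀ c d, g i j c d =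
      if i ≤ c ∧ c < k ∧ j ≤ d ∧ d < m then pvV M i j c d
      else if c = i ∧ d = j then true else false) :
    ∀ s, s ≤ m - j → ∀ c d,
      ((List.range' j s).foldl (fun g l => pvCell M i j k l g) g) i j c d
        = if c = k ∧ j ≤ d ∧ d < j + s then pvV M i j k d else g i j c d := by
  intro s
  induction s with
  | zero =>
    intro _ c d
    rw [List.range'_zero, List.foldl_nil, if_neg (by omega)]
  | succ s ih =>
    intro hs c d
    rw [List.range'_1_concat, List.foldl_append, List.foldl_cons, List.foldl_nil]
    have IH : ∀ c d, ((List.range' j s).foldl (fun g l => pvCell M i j k l g) g) i j c d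
        = if c = k ∧ j ≤ d ∧ d < j + s then pvV M i j k d else g i j c d := ih (by omega)
    have hlm : j + s < m := by omega
    have hA : (decide (j < j + s) &&
          ((List.range' j s).foldl (fun g l => pvCell M i j k l g) g) i j k (j + s - 1) &&
          (decide (pvMget M k (j + s) = pvMget M i j)))
        = (decide (j < j + s) && pvV M i j k (j + s - 1) && (decide (pvMget M k (j + s) = pvMget M i j))) := by
      by_cases h1 : j < j + s
      · rw [IH, if_pos ⟨rfl, by omega, by omega⟩]
      · simp [h1]
    have hB : (decide (i < k) &&
          ((List.range' j s).foldl (fun g l => pvCell M i j k l g) g) i j (k - 1) (j + s) &&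
          (decide (pvMget M k (j + s) = pvMget M i j)))
        = (decide (i < k) && pvV M i j (k - 1) (j + s) && (decide (pvMget M k (j + s) = pvMget M i j))) := by
      by_cases h2 : i < k
      · rw [IH, if_neg (by omega), hprev, if_pos ⟨by omega, by omega, by omega, hlm⟩]
      · simp [h2]
    have hpv : pvV M i j k (j + s) =
        if k = i ∧ j + s = j then true
        else ((decide (j < j + s) && pvV M i j k (j + s - 1) && (decide (pvMget M k (j + s) = pvMget M i j)))
          || (decide (i < k) && pvV M i j (k - 1) (j + s) && (decide (pvMget M k (j + s) = pvMget M i j)))) := by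
      by_cases hsrc : k = i ∧ j + s = j
      · rw [if_pos hsrc, hsrc.1, hsrc.2, pvV_src]
      · rw [if_neg hsrc, pvV_step hik (by omega) hsrc]
    rw [pvCell_apply, hA, hB, pvUpd_apply]
    split
    · next hC =>
      by_cases hkl : c = k ∧ d = j + s
      · rw [if_pos ⟨rfl, rfl, hkl.1, hkl.2⟩, if_pos ⟨hkl.1, by omega, by omega⟩, hkl.2, hpv]
        split_ifs
        · rfl
        · exact hC.symm
      · rw [if_neg (by tauto), IH]
        split_ifs with h1 h2 h3
        · rfl
        · omega
        · exact absurd ⟨h3.1, by omega⟩ hkl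
        · rfl
    · next hC =>
      rw [Bool.not_eq_true] at hC
      rw [IH]
      split_ifs with h1 h2 h3
      · rfl
      · omega
      · have hck : c = k := h3.1
        have hd : d = j + s := by omega
        rw [hprev, if_neg (by omega), hck, hd, hpv]
        split_ifs with h4
        · rfl
        · exact hC.symm
      · rfl

theorem pvBlockA_eval {M : List (List Int)} {n m i j : Nat} (hin : i < n) (hjm : j < m)
    {g0 : Nat → Nat → Nat → Nat → Bool}
    (hg0 : ∀ c d, g0 i j c d = if c = i ∧ d = j then true else false) :
    ∀ c d, c < n → d < m → pvBlockA M n m i j g0 i j c d = pvV M i j c d := by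
  have rows : ∀ t, t ≤ n - i → ∀ c d,
      ((List.range' i t).foldl (fun g k => pvRowA M m i j k g) g0) i j c d
        = if i ≤ c ∧ c < i + t ∧ j ≤ d ∧ d < m then pvV M i j c d else g0 i j c d := by
    intro t
    induction t with
    | zero =>
      intro _ c d
      rw [List.range'_zero, List.foldl_nil, if_neg (by omega)]
    | succ t ih =>
      intro ht c d
      rw [List.range'_1_concat, List.foldl_append, List.foldl_cons, List.foldl_nil]
      have IH := ih (by omega)
      have hprev : ∀ c d,
          ((List.range' i t).foldl (fun g k => pvRowA M m i j k g) g0) i j c d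
            = if i ≤ c ∧ c < i + t ∧ j ≤ d ∧ d < m then pvV M i j c d
              else if c = i ∧ d = j then true else false := by
        intro c d; rw [IH c d, hg0 c d]
      have hrow := pvRowA_eval (m := m) (i + t) (by omega) hjm hprev (m - j) le_rfl c d
      rw [pvRowA]
      rw [hrow]
      have hjm' : j + (m - j) = m := by omega
      rw [hjm']
      rw [hprev, hg0]
      split_ifs <;> first | rfl | omega | simp_all
  intro c d hc hd
  rw [show pvBlockA M n m i j g0 = (List.range' i (n - i)).foldl (fun g k => pvRowA M m i j k g) g0 from rfl]
  rw [rows (n - i) le_rfl c d]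
  split_ifs with h
  · rfl
  · rw [hg0]
    split_ifs with h2
    · exfalso; exact h ⟨by omega, by omega, by omega, by omega⟩
    · rw [eq_comm, pvV_lt (by omega)]

theorem foldl_block_pres {M : List (List Int)} {n m i a b : Nat} :
    ∀ (J : List Nat) (g), (∀ j ∈ J, ¬(a = i ∧ b = j)) →
      ∀ c d, (J.foldl (fun g j => pvBlockA M n m i j g) g) a b c d = g a b c d := by
  intro J
  induction J with
  | nil => intro g _ c d; rfl
  | cons x J ih =>
    intro g h c d
    rw [List.foldl_cons, ih _ (fun j hj => h j (List.mem_cons_of_mem _ hj))]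
    exact pvBlockA_local (h x (List.mem_cons_self ..))

theorem foldl_outer_pres {M : List (List Int)} {n m a b : Nat} :
    ∀ (I : List Nat) (g), (∀ i' ∈ I, i' ≠ a) →
      ∀ c d, (I.foldl (fun g i => (List.range m).foldl (fun g j => pvBlockA M n m i j g) g) g) a b c d
        = g a b c d := by
  intro I
  induction I with
  | nil => intro g _ c d; rfl
  | cons x I ih =>
    intro g h c d
    rw [List.foldl_cons, ih _ (fun i hi => h i (List.mem_cons_of_mem _ hi))]
    exact foldl_block_pres _ _ (fun j _ hq => h x (List.mem_cons_self ..) hq.1.symm) c d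

theorem pvMain_eval {M : List (List Int)} {n m : Nat} (a b : Nat) (ha : a < n) (hb : b < m)
    {v1 : Nat → Nat → Nat → Nat → Bool} :
    ∀ c d, pvMain M n m v1 a b c d = pvBlockA M n m a b v1 a b c d := by
  have hsplitJ : List.range m = List.range' 0 b ++ b :: List.range' (b + 1) (m - b - 1) := by
    have h1 : List.range' 0 b ++ List.range' (0 + 1 * b) (m - b) 1 = List.range' 0 (b + (m - b)) :=
      List.range'_append
    have h2 : m - b = (m - b - 1) + 1 := by omega
    rw [List.range_eq_range', show m = b + (m - b) by omega, ← h1]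
    congr 1
    rw [h2, List.range'_succ]
    simp
  have Jmain : ∀ g, (∀ c d, g a b c d = v1 a b c d) →
      ∀ c d, ((List.range m).foldl (fun g j => pvBlockA M n m a j g) g) a b c d
        = pvBlockA M n m a b v1 a b c d := by
    intro g hg c d
    rw [hsplitJ, List.foldl_append, List.foldl_cons]
    rw [foldl_block_pres _ _ (fun j hj hq => by
      have := List.mem_range'_1.mp hj; omega) c d]
    exact pvBlockA_cong (fun c d => by
      rw [foldl_block_pres _ _ (fun j hj hq => by
        have := List.mem_range'_1.mp hj; omega) c d]
      exact hg c d) c d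
  have hsplitI : List.range n = List.range' 0 a ++ a :: List.range' (a + 1) (n - a - 1) := by
    have h1 : List.range' 0 a ++ List.range' (0 + 1 * a) (n - a) 1 = List.range' 0 (a + (n - a)) :=
      List.range'_append
    rw [List.range_eq_range', show n = a + (n - a) by omega, ← h1]
    congr 1
    rw [show n - a = (n - a - 1) + 1 by omega, List.range'_succ]
    simp
  intro c d
  rw [pvMain, hsplitI, List.foldl_append, List.foldl_cons]
  rw [foldl_outer_pres _ _ (fun i hi => by
    have := List.mem_range'_1.mp hi; omega) c d]
  exact Jmain _ (fun c d => foldl_outer_pres _ _ (fun i hi => by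
    have := List.mem_range'_1.mp hi; omega) c d) c d

theorem gfinal_eval {M : List (List Int)} {n m : Nat} {i j k l : Nat}
    (hi : i < n) (hj : j < m) (hk : k < n) (hl : l < m) :
    pvMain M n m (pvDiagI n m (fun _ _ _ _ => false)) i j k l = pvV M i j k l := by
  rw [pvMain_eval i j hi hj]
  exact pvBlockA_eval hi hj
    (fun c d => by rw [pvDiagI_eval]; split_ifs <;> first | rfl | omega) k l hk hl

-- ---------- bridge: the concrete nested-list array realizes the function model ----------

theorem getD_modify' {α : Type} (l : List α) (i a : Nat) (f : α → α) (d : α) :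
    (l.modify i f).getD a d = if i = a ∧ a < l.length then f (l.getD a d) else l.getD a d := by
  rw [List.getD_eq_getElem?_getD, List.getElem?_modify, List.getD_eq_getElem?_getD]
  by_cases ha : a < l.length
  · rw [List.getElem?_eq_getElem ha]
    by_cases hia : i = a <;> simp [hia, ha]
  · rw [List.getElem?_eq_none (by omega)]
    rw [if_neg (by omega)]
    rfl

theorem getD_set' {α : Type} (l : List α) (i a : Nat) (x d : α) :
    (l.set i x).getD a d = if i = a ∧ a < l.length then x else l.getD a d := by
  rw [List.getD_eq_getElem?_getD, List.getElem?_set, List.getD_eq_getElem?_getD]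
  by_cases hia : i = a
  · subst hia
    by_cases ha : i < l.length
    · simp [ha]
    · rw [if_pos rfl, if_neg ha, if_neg (by omega), List.getElem?_eq_none (by omega)]
  · rw [if_neg hia, if_neg (by omega)]

def pvShape (n m : Nat) (v : List (List (List (List Bool)))) : Prop :=
  v.length = n ∧ ∀ a, a < n →
    ((v.getD a []).length = m ∧ ∀ b, b < m →
      (((v.getD a []).getD b []).length = n ∧ ∀ c, c < n →
        (((v.getD a []).getD b []).getD c []).length = m))

theorem bisim_set {n m : Nat} {v : List (List (List (List Bool)))}
    {g : Nat → Nat → Nat → Nat → Bool} {i j k l : Nat}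
    (hi : i < n) (hj : j < m) (hk : k < n) (hl : l < m)
    (hs : pvShape n m v) (hc : ∀ a b c d, pvGet4 v a b c d = g a b c d) (bv : Bool) :
    pvShape n m (pvSet4 v i j k l bv) ∧
      ∀ a b c d, pvGet4 (pvSet4 v i j k l bv) a b c d = pvUpd g i j k l bv a b c d := by
  obtain ⟨h1, h2⟩ := hs
  have hL1 : (v.getD i []).length = m := (h2 i hi).1
  have hL2 : ((v.getD i []).getD j []).length = n := ((h2 i hi).2 j hj).1
  have hL3 : (((v.getD i []).getD j []).getD k []).length = m := ((h2 i hi).2 j hj).2 k hk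
  have key : ∀ a b c d, pvGet4 (pvSet4 v i j k l bv) a b c d =
      if a = i ∧ b = j ∧ c = k ∧ d = l then bv else pvGet4 v a b c d := by
    intro a b c d
    unfold pvSet4 pvGet4
    rw [getD_modify']
    by_cases hai : i = a
    · subst hai
      rw [if_pos ⟨rfl, by omega⟩, getD_modify']
      by_cases hbj : j = b
      · subst hbj
        rw [if_pos ⟨rfl, by omega⟩, getD_modify']
        by_cases hck : k = c
        · subst hck
          rw [if_pos ⟨rfl, by omega⟩, getD_set']
          by_cases hdl : l = d
          · subst hdl
            rw [if_pos ⟨rfl, by omega⟩, if_pos ⟨rfl, rfl, rfl, rfl⟩]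
          · rw [if_neg (by omega), if_neg (by omega)]
        · rw [if_neg (by omega), if_neg (by omega)]
      · rw [if_neg (by omega), if_neg (by omega)]
    · rw [if_neg (by omega), if_neg (by omega)]
  refine ⟨⟨?_, ?_⟩, fun a b c d => by rw [key, hc a b c d, pvUpd_apply]⟩
  · unfold pvSet4
    rw [List.length_modify, h1]
  · intro a ha
    have hget1 : (pvSet4 v i j k l bv).getD a []
        = if i = a then (v.getD a []).modify j
            (fun vij => vij.modify k (fun vijk => vijk.set l bv))
          else v.getD a [] := by
      unfold pvSet4
      rw [getD_modify']
      by_cases hia : i = a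
      · rw [if_pos ⟨hia, by omega⟩, if_pos hia]
      · rw [if_neg (by tauto), if_neg hia]
    rw [hget1]
    by_cases hia : i = a
    · subst hia
      rw [if_pos rfl]
      refine ⟨by rw [List.length_modify]; exact (h2 i hi).1, ?_⟩
      intro b hb
      have hget2 : ((v.getD i []).modify j
            (fun vij => vij.modify k (fun vijk => vijk.set l bv))).getD b []
          = if j = b then ((v.getD i []).getD b []).modify k (fun vijk => vijk.set l bv)
            else (v.getD i []).getD b [] := by
        rw [getD_modify']
        by_cases hjb : j = b
        · rw [if_pos ⟨hjb, by omega⟩, if_pos hjb]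
        · rw [if_neg (by tauto), if_neg hjb]
      rw [hget2]
      by_cases hjb : j = b
      · subst hjb
        rw [if_pos rfl]
        refine ⟨by rw [List.length_modify]; exact ((h2 i hi).2 j hj).1, ?_⟩
        intro c hcn
        have hget3 : (((v.getD i []).getD j []).modify k (fun vijk => vijk.set l bv)).getD c []
            = if k = c then (((v.getD i []).getD j []).getD c []).set l bv
              else ((v.getD i []).getD j []).getD c [] := by
          rw [getD_modify']
          by_cases hkc : k = c
          · rw [if_pos ⟨hkc, by omega⟩, if_pos hkc]
          · rw [if_neg (by tauto), if_neg hkc]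
        rw [hget3]
        by_cases hkc : k = c
        · subst hkc
          rw [if_pos rfl, List.length_set]
          exact ((h2 i hi).2 j hj).2 k hcn
        · rw [if_neg hkc]
          exact ((h2 i hi).2 j hj).2 c hcn
      · rw [if_neg hjb]
        exact (h2 i hi).2 b hb
    · rw [if_neg hia]
      exact h2 a ha

theorem bisim_cell {M : List (List Int)} {n m : Nat} {v : List (List (List (List Bool)))}
    {g : Nat → Nat → Nat → Nat → Bool} {i j k l : Nat}
    (hi : i < n) (hj : j < m) (hk : k < n) (hl : l < m)
    (hs : pvShape n m v) (hc : ∀ a b c d, pvGet4 v a b c d = g a b c d) :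
    pvShape n m (pvCellL M i j k l v) ∧
      ∀ a b c d, pvGet4 (pvCellL M i j k l v) a b c d = pvCell M i j k l g a b c d := by
  have hcond :
      ((decide (j < l) && pvGet4 v i j k (l - 1) && decide (pvMget M k l = pvMget M i j))
        || (decide (i < k) && pvGet4 v i j (k - 1) l && decide (pvMget M k l = pvMget M i j)))
      = ((decide (j < l) && g i j k (l - 1) && decide (pvMget M k l = pvMget M i j))
        || (decide (i < k) && g i j (k - 1) l && decide (pvMget M k l = pvMget M i j))) := by
    rw [hc, hc]
  unfold pvCellL
  rw [hcond]
  constructor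
  · split
    · exact (bisim_set hi hj hk hl hs hc true).1
    · exact hs
  · intro a b c d
    rw [pvCell_apply]
    split
    · exact (bisim_set hi hj hk hl hs hc true).2 a b c d
    · exact hc a b c d

theorem bisim_row {M : List (List Int)} {n m : Nat} {i j k : Nat}
    (hi : i < n) (hj : j < m) (hk : k < n) :
    ∀ (L : List Nat), (∀ l ∈ L, l < m) →
      ∀ (v : List (List (List (List Bool)))) (g : Nat → Nat → Nat → Nat → Bool),
        pvShape n m v → (∀ a b c d, pvGet4 v a b c d = g a b c d) →
        pvShape n m (L.foldl (fun v l => pvCellL M i j k l v) v) ∧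
          ∀ a b c d, pvGet4 (L.foldl (fun v l => pvCellL M i j k l v) v) a b c d
            = (L.foldl (fun g l => pvCell M i j k l g) g) a b c d := by
  intro L
  induction L with
  | nil => exact fun _ v g hs hc => ⟨hs, hc⟩
  | cons x L ih =>
    intro hL v g hs hc
    obtain ⟨hs', hc'⟩ := bisim_cell (l := x) hi hj hk (hL x (List.mem_cons_self ..)) hs hc
    exact ih (fun l hl => hL l (List.mem_cons_of_mem _ hl)) _ _ hs' hc'

theorem bisim_block {M : List (List Int)} {n m : Nat} {i j : Nat}
    (hi : i < n) (hj : j < m) :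
    ∀ (L : List Nat), (∀ k ∈ L, k < n) →
      ∀ (v : List (List (List (List Bool)))) (g : Nat → Nat → Nat → Nat → Bool),
        pvShape n m v → (∀ a b c d, pvGet4 v a b c d = g a b c d) →
        pvShape n m (L.foldl (fun v k => pvRowL M m i j k v) v) ∧
          ∀ a b c d, pvGet4 (L.foldl (fun v k => pvRowL M m i j k v) v) a b c d
            = (L.foldl (fun g k => pvRowA M m i j k g) g) a b c d := by
  intro L
  induction L with
  | nil => exact fun _ v g hs hc => ⟨hs, hc⟩
  | cons x L ih =>
    intro hL v g hs hc
    obtain ⟨hs', hc'⟩ := bisim_row (k := x) hi hj (hL x (List.mem_cons_self ..))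
      (List.range' j (m - j)) (fun l hl => by have := List.mem_range'_1.mp hl; omega) v g hs hc
    exact ih (fun k hk => hL k (List.mem_cons_of_mem _ hk)) _ _ hs' hc'

theorem bisim_diagJ {n m : Nat} {i : Nat} (hi : i < n) :
    ∀ (L : List Nat), (∀ j ∈ L, j < m) →
      ∀ (v : List (List (List (List Bool)))) (g : Nat → Nat → Nat → Nat → Bool),
        pvShape n m v → (∀ a b c d, pvGet4 v a b c d = g a b c d) →
        pvShape n m (L.foldl (fun v j => pvSet4 v i j i j true) v) ∧
          ∀ a b c d, pvGet4 (L.foldl (fun v j => pvSet4 v i j i j true) v) a b c d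
            = (L.foldl (fun g j => pvUpd g i j i j true) g) a b c d := by
  intro L
  induction L with
  | nil => exact fun _ v g hs hc => ⟨hs, hc⟩
  | cons x L ih =>
    intro hL v g hs hc
    obtain ⟨hs', hc'⟩ := bisim_set hi (hL x (List.mem_cons_self ..)) hi
      (hL x (List.mem_cons_self ..)) hs hc true
    exact ih (fun j hj => hL j (List.mem_cons_of_mem _ hj)) _ _ hs' hc'

theorem bisim_diagI {n m : Nat} :
    ∀ (L : List Nat), (∀ i ∈ L, i < n) →
      ∀ (v : List (List (List (List Bool)))) (g : Nat → Nat → Nat → Nat → Bool),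
        pvShape n m v → (∀ a b c d, pvGet4 v a b c d = g a b c d) →
        pvShape n m (L.foldl (fun v i => pvDiagJL i m v) v) ∧
          ∀ a b c d, pvGet4 (L.foldl (fun v i => pvDiagJL i m v) v) a b c d
            = (L.foldl (fun g i => pvDiagJ i m g) g) a b c d := by
  intro L
  induction L with
  | nil => exact fun _ v g hs hc => ⟨hs, hc⟩
  | cons x L ih =>
    intro hL v g hs hc
    obtain ⟨hs', hc'⟩ := bisim_diagJ (hL x (List.mem_cons_self ..)) (List.range m)
      (fun j hj => List.mem_range.mp hj) v g hs hc
    exact ih (fun i hi => hL i (List.mem_cons_of_mem _ hi)) _ _ hs' hc'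

theorem bisim_blocksJ {M : List (List Int)} {n m : Nat} {i : Nat} (hi : i < n) :
    ∀ (L : List Nat), (∀ j ∈ L, j < m) →
      ∀ (v : List (List (List (List Bool)))) (g : Nat → Nat → Nat → Nat → Bool),
        pvShape n m v → (∀ a b c d, pvGet4 v a b c d = g a b c d) →
        pvShape n m (L.foldl (fun v j => pvBlockL M n m i j v) v) ∧
          ∀ a b c d, pvGet4 (L.foldl (fun v j => pvBlockL M n m i j v) v) a b c d
            = (L.foldl (fun g j => pvBlockA M n m i j g) g) a b c d := by
  intro L
  induction L with
  | nil => exact fun _ v g hs hc => ⟨hs, hc⟩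
  | cons x L ih =>
    intro hL v g hs hc
    have hx : x < m := hL x (List.mem_cons_self ..)
    obtain ⟨hs', hc'⟩ := bisim_block (j := x) hi hx
      (List.range' i (n - i)) (fun k hk => by have := List.mem_range'_1.mp hk; omega) v g hs hc
    exact ih (fun j hj => hL j (List.mem_cons_of_mem _ hj)) _ _ hs' hc'

theorem bisim_main {M : List (List Int)} {n m : Nat} :
    ∀ (L : List Nat), (∀ i ∈ L, i < n) →
      ∀ (v : List (List (List (List Bool)))) (g : Nat → Nat → Nat → Nat → Bool),
        pvShape n m v → (∀ a b c d, pvGet4 v a b c d = g a b c d) →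
        pvShape n m (L.foldl (fun v i => (List.range m).foldl (fun v j => pvBlockL M n m i j v) v) v) ∧
          ∀ a b c d, pvGet4 (L.foldl (fun v i => (List.range m).foldl (fun v j => pvBlockL M n m i j v) v) v) a b c d
            = (L.foldl (fun g i => (List.range m).foldl (fun g j => pvBlockA M n m i j g) g) g) a b c d := by
  intro L
  induction L with
  | nil => exact fun _ v g hs hc => ⟨hs, hc⟩
  | cons x L ih =>
    intro hL v g hs hc
    obtain ⟨hs', hc'⟩ := bisim_blocksJ (hL x (List.mem_cons_self ..)) (List.range m)
      (fun j hj => List.mem_range.mp hj) v g hs hc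
    exact ih (fun i hi => hL i (List.mem_cons_of_mem _ hi)) _ _ hs' hc'

theorem v0_shape (n m : Nat) :
    pvShape n m ((List.range n).map fun _ => (List.range m).map fun _ =>
      (List.range n).map fun _ => (List.range m).map fun _ => false) := by
  refine ⟨by simp, fun a ha => ?_⟩
  rw [PySem.List.getD_map_range _ _ _ _ ha]
  refine ⟨by simp, fun b hb => ?_⟩
  rw [PySem.List.getD_map_range _ _ _ _ hb]
  refine ⟨by simp, fun c hcn => ?_⟩
  rw [PySem.List.getD_map_range _ _ _ _ hcn]
  simp

theorem v0_get (n m : Nat) : ∀ a b c d,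
    pvGet4 ((List.range n).map fun _ => (List.range m).map fun _ =>
      (List.range n).map fun _ => (List.range m).map fun _ => false) a b c d = false := by
  intro a b c d
  unfold pvGet4
  by_cases ha : a < n
  · rw [PySem.List.getD_map_range _ _ _ _ ha]
    by_cases hb : b < m
    · rw [PySem.List.getD_map_range _ _ _ _ hb]
      by_cases hcn : c < n
      · rw [PySem.List.getD_map_range _ _ _ _ hcn]
        by_cases hd : d < m
        · rw [PySem.List.getD_map_range _ _ _ _ hd]
        · rw [List.getD_eq_default (n := d) _ _ (by rw [List.length_map, List.length_range]; omega)]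
      · rw [List.getD_eq_default (n := c) _ _ (by rw [List.length_map, List.length_range]; omega)]
        rfl
    · rw [List.getD_eq_default (n := b) _ _ (by rw [List.length_map, List.length_range]; omega)]
      rfl
  · rw [List.getD_eq_default (n := a) _ _ (by rw [List.length_map, List.length_range]; omega)]
    rfl

theorem list_eq_map_getD {α : Type} (l : List α) (n : Nat) (d : α) (h : l.length = n) :
    l = (List.range n).map (fun i => l.getD i d) := by
  refine List.ext_getElem (by simp [h]) (fun i h1 h2 => ?_)
  simp only [List.getElem_map, List.getElem_range]
  rw [List.getD_eq_getElem?_getD, List.getElem?_eq_getElem h1]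
  rfl

theorem shape_ext {n m : Nat} {v : List (List (List (List Bool)))} (hs : pvShape n m v) :
    v = (List.range n).map fun a => (List.range m).map fun b =>
        (List.range n).map fun c => (List.range m).map fun d => pvGet4 v a b c d := by
  obtain ⟨h1, h2⟩ := hs
  conv_lhs => rw [list_eq_map_getD v n [] h1]
  refine List.map_congr_left (fun a ha => ?_)
  rw [List.mem_range] at ha
  conv_lhs => rw [list_eq_map_getD (v.getD a []) m [] (h2 a ha).1]
  refine List.map_congr_left (fun b hb => ?_)
  rw [List.mem_range] at hb
  conv_lhs => rw [list_eq_map_getD ((v.getD a []).getD b []) n [] ((h2 a ha).2 b hb).1]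
  refine List.map_congr_left (fun c hcn => ?_)
  rw [List.mem_range] at hcn
  conv_lhs => rw [list_eq_map_getD (((v.getD a []).getD b []).getD c []) m false
    (((h2 a ha).2 b hb).2 c hcn)]
  rfl

theorem A_eval (M : List (List Int)) :
    precompute_validity M =
      (List.range M.length).map fun i =>
        (List.range (if 0 < M.length then (M.headD []).length else 0)).map fun j =>
          (List.range M.length).map fun k =>
            (List.range (if 0 < M.length then (M.headD []).length else 0)).map fun l =>
              pvV M i j k l := by
  simp only [precompute_validity]
  rw [pvMainL, pvDiagIL]
  obtain ⟨hs1, hc1⟩ := bisim_diagI (n := M.length)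
    (m := if 0 < M.length then (M.headD []).length else 0)
    (List.range M.length) (fun i hi => List.mem_range.mp hi) _ (fun _ _ _ _ => false)
    (v0_shape _ _) (v0_get _ _)
  obtain ⟨hs2, hc2⟩ := bisim_main (M := M) (List.range M.length)
    (fun i hi => List.mem_range.mp hi) _ _ hs1 hc1
  rw [shape_ext hs2]
  refine List.map_congr_left (fun i hi => ?_)
  refine List.map_congr_left (fun j hj => ?_)
  refine List.map_congr_left (fun k hk => ?_)
  refine List.map_congr_left (fun l hl => ?_)
  rw [List.mem_range] at hi hj hk hl
  rw [hc2]
  exact gfinal_eval hi hj hk hl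

-- ---------- B side: the BFS invariant ----------

-- cells already seen after round d: monotone-path-reachable, within i+j+d steps
def pvBase (M : List (List Int)) (i j n m d k l : Nat) : Prop :=
  k < n ∧ l < m ∧ k + l ≤ i + j + d ∧ pvV M i j k l = true

-- the frontier of round d: reachable cells at distance exactly d
def pvFront (M : List (List Int)) (i j n m d k l : Nat) : Prop :=
  k < n ∧ l < m ∧ k + l = i + j + d ∧ pvV M i j k l = true

-- cells newly marked while processing the prefix P of the current frontier
def pvNewp (M : List (List Int)) (v : Int) (n m : Nat) (P : List (Nat × Nat)) (k l : Nat) : Prop :=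
  k < n ∧ l < m ∧ pvMget M k l = v ∧
    ((∃ c, (k, c) ∈ P ∧ c + 1 = l) ∨ (∃ r, (r, l) ∈ P ∧ r + 1 = k))

theorem pvV_ge {M : List (List Int)} {i j k l : Nat} (h : pvV M i j k l = true) :
    i ≤ k ∧ j ≤ l := by
  constructor
  · by_contra hk
    rw [pvV_lt (Or.inl (by omega))] at h
    exact Bool.false_ne_true h
  · by_contra hl
    rw [pvV_lt (Or.inr (by omega))] at h
    exact Bool.false_ne_true h

theorem pvNewp_append {M : List (List Int)} {v : Int} {n m : Nat} {P : List (Nat × Nat)}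
    {r c : Nat} (k l : Nat) :
    pvNewp M v n m (P ++ [(r, c)]) k l ↔
      pvNewp M v n m P k l ∨
        (k < n ∧ l < m ∧ pvMget M k l = v ∧ ((k = r ∧ l = c + 1) ∨ (k = r + 1 ∧ l = c))) := by
  unfold pvNewp
  constructor
  · rintro ⟨hk, hl, he, (⟨c', hc', h1⟩ | ⟨r', hr', h1⟩)⟩
    · rcases List.mem_append.mp hc' with h | h
      · exact Or.inl ⟨hk, hl, he, Or.inl ⟨c', h, h1⟩⟩
      · simp only [List.mem_singleton, Prod.mk.injEq] at h
        exact Or.inr ⟨hk, hl, he, Or.inl ⟨h.1, by omega⟩⟩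
    · rcases List.mem_append.mp hr' with h | h
      · exact Or.inl ⟨hk, hl, he, Or.inr ⟨r', h, h1⟩⟩
      · simp only [List.mem_singleton, Prod.mk.injEq] at h
        exact Or.inr ⟨hk, hl, he, Or.inr ⟨by omega, h.2⟩⟩
  · rintro (⟨hk, hl, he, (⟨c', hc', h1⟩ | ⟨r', hr', h1⟩)⟩ | ⟨hk, hl, he, (⟨h1, h2⟩ | ⟨h1, h2⟩)⟩)
    · exact ⟨hk, hl, he, Or.inl ⟨c', List.mem_append.mpr (Or.inl hc'), h1⟩⟩
    · exact ⟨hk, hl, he, Or.inr ⟨r', List.mem_append.mpr (Or.inl hr'), h1⟩⟩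
    · exact ⟨hk, hl, he, Or.inl ⟨c, List.mem_append.mpr (Or.inr (by simp [h1])), by omega⟩⟩
    · exact ⟨hk, hl, he, Or.inr ⟨r, List.mem_append.mpr (Or.inr (by simp [h2])), by omega⟩⟩

theorem pvVisit_mem1 (M : List (List Int)) (n m : Nat) (v : Int)
    (st : List (Nat × Nat) × List (Nat × Nat)) (q x : Nat × Nat) :
    (x ∈ (pvVisit M n m v st q).1) ↔
      x ∈ st.1 ∨ (x = q ∧ q.1 < n ∧ q.2 < m ∧ pvMget M q.1 q.2 = v) := by
  unfold pvVisit
  split_ifs with h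
  · simp only [List.mem_append, List.mem_singleton]
    constructor
    · rintro (hx | hx)
      · exact Or.inl hx
      · exact Or.inr ⟨hx, h.1, h.2.1, h.2.2.2⟩
    · rintro (hx | hx)
      · exact Or.inl hx
      · exact Or.inr hx.1
  · constructor
    · exact Or.inl
    · rintro (hx | ⟨hxq, h1, h2, h3⟩)
      · exact hx
      · subst hxq
        by_contra hmem
        exact h ⟨h1, h2, hmem, h3⟩

theorem pvVisit_mem2 (M : List (List Int)) (n m : Nat) (v : Int)
    (st : List (Nat × Nat) × List (Nat × Nat)) (q x : Nat × Nat) :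
    (x ∈ (pvVisit M n m v st q).2) ↔
      x ∈ st.2 ∨ (x = q ∧ q.1 < n ∧ q.2 < m ∧ ¬(q ∈ st.1) ∧ pvMget M q.1 q.2 = v) := by
  unfold pvVisit
  split_ifs with h
  · simp only [List.mem_append, List.mem_singleton]
    constructor
    · rintro (hx | hx)
      · exact Or.inl hx
      · exact Or.inr ⟨hx, h.1, h.2.1, h.2.2.1, h.2.2.2⟩
    · rintro (hx | hx)
      · exact Or.inl hx
      · exact Or.inr hx.1
  · constructor
    · exact Or.inl
    · rintro (hx | ⟨hxq, h1, h2, h3, h4⟩)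
      · exact hx
      · exact absurd ⟨h1, h2, h3, h4⟩ h

theorem pvCellStep (M : List (List Int)) (i j n m d r c : Nat) (P seen nxt : List (Nat × Nat))
    (hrc : pvFront M i j n m d r c)
    (hseen : ∀ k l, ((k, l) ∈ seen ↔ pvBase M i j n m d k l ∨ pvNewp M (pvMget M i j) n m P k l))
    (hnxt : ∀ q : Nat × Nat, (q ∈ nxt ↔ pvNewp M (pvMget M i j) n m P q.1 q.2)) :
    (∀ k l, ((k, l) ∈ (pvVisit M n m (pvMget M i j)
          (pvVisit M n m (pvMget M i j) (seen, nxt) (r, c + 1)) (r + 1, c)).1 ↔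
        pvBase M i j n m d k l ∨ pvNewp M (pvMget M i j) n m (P ++ [(r, c)]) k l)) ∧
    (∀ q : Nat × Nat, (q ∈ (pvVisit M n m (pvMget M i j)
          (pvVisit M n m (pvMget M i j) (seen, nxt) (r, c + 1)) (r + 1, c)).2 ↔
        pvNewp M (pvMget M i j) n m (P ++ [(r, c)]) q.1 q.2)) := by
  obtain ⟨hrn, hcm, hsum, hpv⟩ := hrc
  have hB1 : ¬ pvBase M i j n m d r (c + 1) := by
    rintro ⟨_, _, hs, _⟩; omega
  have hB2 : ¬ pvBase M i j n m d (r + 1) c := by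
    rintro ⟨_, _, hs, _⟩; omega
  constructor
  · intro k l
    simp only [pvVisit_mem1, hseen, pvNewp_append]
    constructor
    · rintro ((h | ⟨hq, h1, h2, h3⟩) | ⟨hq, h1, h2, h3⟩)
      · exact h.imp_right Or.inl
      · rw [Prod.mk.injEq] at hq
        exact Or.inr (Or.inr ⟨by omega, by omega, by rw [hq.1, hq.2]; exact h3,
          Or.inl ⟨hq.1, hq.2⟩⟩)
      · rw [Prod.mk.injEq] at hq
        exact Or.inr (Or.inr ⟨by omega, by omega, by rw [hq.1, hq.2]; exact h3,
          Or.inr ⟨hq.1, hq.2⟩⟩)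
    · rintro (h | (h | ⟨hk, hl, he, (⟨h1, h2⟩ | ⟨h1, h2⟩)⟩))
      · exact Or.inl (Or.inl (Or.inl h))
      · exact Or.inl (Or.inl (Or.inr h))
      · exact Or.inl (Or.inr ⟨by rw [Prod.mk.injEq]; exact ⟨h1, h2⟩, by omega, by omega,
          by rw [← h1, ← h2]; exact he⟩)
      · exact Or.inr ⟨by rw [Prod.mk.injEq]; exact ⟨h1, h2⟩, by omega, by omega,
          by rw [← h1, ← h2]; exact he⟩
  · rintro ⟨k, l⟩
    simp only [pvVisit_mem2, pvVisit_mem1, hseen, hnxt, pvNewp_append]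
    constructor
    · rintro ((h | ⟨hq, h1, h2, hns, h3⟩) | ⟨hq, h1, h2, hns, h3⟩)
      · exact Or.inl h
      · rw [Prod.mk.injEq] at hq
        exact Or.inr ⟨by omega, by omega, by rw [hq.1, hq.2]; exact h3, Or.inl ⟨hq.1, hq.2⟩⟩
      · rw [Prod.mk.injEq] at hq
        exact Or.inr ⟨by omega, by omega, by rw [hq.1, hq.2]; exact h3, Or.inr ⟨hq.1, hq.2⟩⟩
    · rintro (h | ⟨hk, hl, he, (⟨h1, h2⟩ | ⟨h1, h2⟩)⟩)
      · exact Or.inl (Or.inl h)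
      · by_cases hNP : pvNewp M (pvMget M i j) n m P r (c + 1)
        · exact Or.inl (Or.inl (by rw [h1, h2]; exact hNP))
        · refine Or.inl (Or.inr ⟨by rw [Prod.mk.injEq]; exact ⟨h1, h2⟩, by omega, by omega,
            ?_, by rw [← h1, ← h2]; exact he⟩)
          rintro (hb | hnp)
          · exact hB1 hb
          · exact hNP hnp
      · by_cases hNP : pvNewp M (pvMget M i j) n m P (r + 1) c
        · exact Or.inl (Or.inl (by rw [h1, h2]; exact hNP))
        · refine Or.inr ⟨by rw [Prod.mk.injEq]; exact ⟨h1, h2⟩, by omega, by omega, ?_,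
            by rw [← h1, ← h2]; exact he⟩
          rintro ((hb | hnp) | ⟨heq, _⟩)
          · exact hB2 hb
          · exact hNP hnp
          · rw [Prod.mk.injEq] at heq
            omega

theorem pvFoldStep (M : List (List Int)) (i j n m d : Nat) :
    ∀ (F P seen nxt : List (Nat × Nat)),
      (∀ q ∈ F, pvFront M i j n m d q.1 q.2) →
      (∀ k l, ((k, l) ∈ seen ↔ pvBase M i j n m d k l ∨ pvNewp M (pvMget M i j) n m P k l)) →
      (∀ q : Nat × Nat, (q ∈ nxt ↔ pvNewp M (pvMget M i j) n m P q.1 q.2)) →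
      (∀ k l, ((k, l) ∈ (F.foldl (fun st rc => pvVisit M n m (pvMget M i j)
            (pvVisit M n m (pvMget M i j) st (rc.1, rc.2 + 1)) (rc.1 + 1, rc.2)) (seen, nxt)).1 ↔
          pvBase M i j n m d k l ∨ pvNewp M (pvMget M i j) n m (P ++ F) k l)) ∧
      (∀ q : Nat × Nat, (q ∈ (F.foldl (fun st rc => pvVisit M n m (pvMget M i j)
            (pvVisit M n m (pvMget M i j) st (rc.1, rc.2 + 1)) (rc.1 + 1, rc.2)) (seen, nxt)).2 ↔
          pvNewp M (pvMget M i j) n m (P ++ F) q.1 q.2)) := by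
  intro F
  induction F with
  | nil =>
    intro P seen nxt _ hs hn
    simp only [List.foldl_nil, List.append_nil]
    exact ⟨hs, hn⟩
  | cons x F ih =>
    intro P seen nxt hF hs hn
    obtain ⟨H1, H2⟩ := pvCellStep M i j n m d x.1 x.2 P seen nxt
      (hF x (List.mem_cons_self ..)) hs hn
    have hF' : ∀ q ∈ F, pvFront M i j n m d q.1 q.2 :=
      fun q hq => hF q (List.mem_cons_of_mem _ hq)
    rw [List.foldl_cons]
    have hres := ih (P ++ [(x.1, x.2)]) _ _ hF' H1 H2
    simp only [Prod.mk.eta] at hres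
    rw [← List.append_cons] at hres
    exact hres

theorem pvNewp_front (M : List (List Int)) (i j n m d : Nat) (F : List (Nat × Nat))
    (hF : ∀ q : Nat × Nat, (q ∈ F ↔ pvFront M i j n m d q.1 q.2)) (k l : Nat) :
    pvNewp M (pvMget M i j) n m F k l ↔ pvFront M i j n m (d + 1) k l := by
  constructor
  · rintro ⟨hk, hl, he, (⟨c, hc, rfl⟩ | ⟨r, hr, rfl⟩)⟩
    · obtain ⟨hk', hc', hsum, hpv⟩ := (hF (k, c)).mp hc
      have hge := pvV_ge hpv
      refine ⟨hk, hl, by omega, ?_⟩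
      rw [pvV_step (show i ≤ k by omega) (show j ≤ c + 1 by omega) (by rintro ⟨h1, h2⟩; omega)]
      have hjc : j < c + 1 := by omega
      simp [hpv, he, hjc]
    · obtain ⟨hr', hl', hsum, hpv⟩ := (hF (r, l)).mp hr
      have hge := pvV_ge hpv
      refine ⟨hk, hl, by omega, ?_⟩
      rw [pvV_step (show i ≤ r + 1 by omega) (show j ≤ l by omega) (by rintro ⟨h1, h2⟩; omega)]
      have hir : i < r + 1 := by omega
      simp [hpv, he, hir]
  · rintro ⟨hk, hl, hsum, hpv⟩
    have hge := pvV_ge hpv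
    have hnot : ¬(k = i ∧ l = j) := by rintro ⟨rfl, rfl⟩; omega
    rw [pvV_step hge.1 hge.2 hnot] at hpv
    simp only [Bool.or_eq_true, Bool.and_eq_true, decide_eq_true_eq] at hpv
    rcases hpv with ⟨⟨hjl, hprev⟩, heq⟩ | ⟨⟨hik, hprev⟩, heq⟩
    · refine ⟨hk, hl, heq, Or.inl ⟨l - 1, (hF (k, l - 1)).mpr ⟨hk, by omega, by omega, hprev⟩,
        by omega⟩⟩
    · refine ⟨hk, hl, heq, Or.inr ⟨k - 1, (hF (k - 1, l)).mpr ⟨by omega, hl, by omega, hprev⟩,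
        by omega⟩⟩

theorem pvLevel_char (M : List (List Int)) (i j n m d : Nat) (seen F : List (Nat × Nat))
    (hs : ∀ k l, ((k, l) ∈ seen ↔ pvBase M i j n m d k l))
    (hf : ∀ q : Nat × Nat, (q ∈ F ↔ pvFront M i j n m d q.1 q.2)) :
    (∀ k l, ((k, l) ∈ (pvLevel M n m (pvMget M i j) seen F).1 ↔ pvBase M i j n m (d + 1) k l)) ∧
    (∀ q : Nat × Nat, (q ∈ (pvLevel M n m (pvMget M i j) seen F).2 ↔
        pvFront M i j n m (d + 1) q.1 q.2)) := by
  have hFr : ∀ q ∈ F, pvFront M i j n m d q.1 q.2 := fun q hq => (hf q).mp hq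
  have h0s : ∀ k l, ((k, l) ∈ seen ↔
      pvBase M i j n m d k l ∨ pvNewp M (pvMget M i j) n m [] k l) := by
    intro k l
    rw [hs]
    simp [pvNewp]
  have h0n : ∀ q : Nat × Nat, (q ∈ ([] : List (Nat × Nat)) ↔
      pvNewp M (pvMget M i j) n m [] q.1 q.2) := by
    simp [pvNewp]
  obtain ⟨H1, H2⟩ := pvFoldStep M i j n m d F [] seen [] hFr h0s h0n
  unfold pvLevel
  constructor
  · intro k l
    rw [H1 k l, List.nil_append, pvNewp_front M i j n m d F hf]
    unfold pvBase pvFront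
    constructor
    · rintro (⟨a, b, hc, e⟩ | ⟨a, b, hc, e⟩) <;> exact ⟨a, b, by omega, e⟩
    · rintro ⟨a, b, hc, e⟩
      rcases Nat.lt_or_ge (k + l) (i + j + d + 1) with h | h
      · exact Or.inl ⟨a, b, by omega, e⟩
      · exact Or.inr ⟨a, b, by omega, e⟩
  · intro q
    rw [H2 q, List.nil_append, pvNewp_front M i j n m d F hf]

theorem pvV_pred {M : List (List Int)} {i j n m k l : Nat} (hk : k < n) (hl : l < m)
    (hpv : pvV M i j k l = true) (hsum : i + j < k + l) :
    ∃ k' l', k' < n ∧ l' < m ∧ pvV M i j k' l' = true ∧ k' + l' + 1 = k + l := by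
  have hge := pvV_ge hpv
  have hnot : ¬(k = i ∧ l = j) := by rintro ⟨rfl, rfl⟩; omega
  rw [pvV_step hge.1 hge.2 hnot] at hpv
  simp only [Bool.or_eq_true, Bool.and_eq_true, decide_eq_true_eq] at hpv
  rcases hpv with ⟨⟨hjl, hprev⟩, _⟩ | ⟨⟨hik, hprev⟩, _⟩
  · exact ⟨k, l - 1, hk, by omega, hprev, by omega⟩
  · exact ⟨k - 1, l, by omega, hl, hprev, by omega⟩

theorem pvNoBeyond (M : List (List Int)) (i j n m d : Nat)
    (hempty : ∀ k l, k < n → l < m → k + l = i + j + d → pvV M i j k l = false) :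
    ∀ e k l, k < n → l < m → k + l = i + j + d + 1 + e → pvV M i j k l = false := by
  intro e
  induction e with
  | zero =>
    intro k l hk hl hsum
    by_contra hc
    rw [Bool.not_eq_false] at hc
    obtain ⟨k', l', hk', hl', hpv', hs'⟩ := pvV_pred hk hl hc (by omega)
    rw [hempty k' l' hk' hl' (by omega)] at hpv'
    exact Bool.false_ne_true hpv'
  | succ e ih =>
    intro k l hk hl hsum
    by_contra hc
    rw [Bool.not_eq_false] at hc
    obtain ⟨k', l', hk', hl', hpv', hs'⟩ := pvV_pred hk hl hc (by omega)
    rw [ih k' l' hk' hl' (by omega)] at hpv'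
    exact Bool.false_ne_true hpv'

theorem pvBFS_char (M : List (List Int)) (i j n m : Nat) :
    ∀ (fuel d : Nat) (seen frontier : List (Nat × Nat)),
      (∀ k l, ((k, l) ∈ seen ↔ pvBase M i j n m d k l)) →
      (∀ q : Nat × Nat, (q ∈ frontier ↔ pvFront M i j n m d q.1 q.2)) →
      n + m ≤ d + fuel →
      ∀ k l, ((k, l) ∈ pvBFS M n m (pvMget M i j) fuel seen frontier ↔
        (k < n ∧ l < m ∧ pvV M i j k l = true)) := by
  intro fuel
  induction fuel with
  | zero =>
    intro d seen frontier hs _ hfuel k l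
    rw [pvBFS, hs]
    unfold pvBase
    constructor
    · rintro ⟨a, b, _, e⟩
      exact ⟨a, b, e⟩
    · rintro ⟨a, b, e⟩
      exact ⟨a, b, by omega, e⟩
  | succ fuel ih =>
    intro d seen frontier hs hf hfuel k l
    rw [pvBFS]
    by_cases hemp : frontier.isEmpty
    · rw [if_pos hemp]
      have hempty : ∀ a b, a < n → b < m → a + b = i + j + d → pvV M i j a b = false := by
        intro a b ha hb hsum
        by_contra hc
        rw [Bool.not_eq_false] at hc
        have hmem : (a, b) ∈ frontier := (hf (a, b)).mpr ⟨ha, hb, hsum, hc⟩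
        rw [List.isEmpty_iff] at hemp
        rw [hemp] at hmem
        exact absurd hmem (List.not_mem_nil)
      rw [hs]
      unfold pvBase
      constructor
      · rintro ⟨a, b, _, e⟩
        exact ⟨a, b, e⟩
      · rintro ⟨a, b, e⟩
        refine ⟨a, b, ?_, e⟩
        by_contra hgt
        have := pvNoBeyond M i j n m d hempty (k + l - (i + j + d + 1)) k l a b (by omega)
        rw [this] at e
        exact Bool.false_ne_true e
    · rw [if_neg hemp]
      obtain ⟨H1, H2⟩ := pvLevel_char M i j n m d seen frontier hs hf
      exact ih (d + 1) _ _ H1 H2 (by omega) k l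

theorem pvContains_eq (S : List (Nat × Nat)) (k l : Nat) (b : Bool)
    (h : ((k, l) ∈ S ↔ b = true)) : S.contains (k, l) = b := by
  cases hb : b
  · rw [hb] at h
    simp only [Bool.false_eq_true, iff_false] at h
    exact Bool.eq_false_iff.mpr (fun hc => h (List.contains_iff_mem.mp hc))
  · exact List.contains_iff_mem.mpr (h.mpr hb)

theorem B_eval (M : List (List Int)) :
    precompute_validity_alt M =
      (List.range M.length).map fun i =>
        (List.range (if 0 < M.length then (M.headD []).length else 0)).map fun j =>
          (List.range M.length).map fun k =>
            (List.range (if 0 < M.length then (M.headD []).length else 0)).map fun l =>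
              pvV M i j k l := by
  simp only [precompute_validity_alt]
  refine List.map_congr_left (fun i hi => ?_)
  refine List.map_congr_left (fun j hj => ?_)
  rw [List.mem_range] at hi hj
  refine List.map_congr_left (fun k hk => ?_)
  refine List.map_congr_left (fun l hl => ?_)
  rw [List.mem_range] at hk hl
  have hseen : ∀ a b : Nat, ((a, b) ∈ ([(i, j)] : List (Nat × Nat)) ↔
      pvBase M i j M.length (if 0 < M.length then (M.headD []).length else 0) 0 a b) := by
    intro a b
    simp only [List.mem_singleton, Prod.mk.injEq]
    constructor
    · rintro ⟨rfl, rfl⟩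
      exact ⟨hi, hj, by omega, pvV_src M a b⟩
    · rintro ⟨_, _, hsum, hpv⟩
      have := pvV_ge hpv
      exact ⟨by omega, by omega⟩
  have hfront : ∀ q : Nat × Nat, (q ∈ ([(i, j)] : List (Nat × Nat)) ↔
      pvFront M i j M.length (if 0 < M.length then (M.headD []).length else 0) 0 q.1 q.2) := by
    rintro ⟨a, b⟩
    simp only [List.mem_singleton, Prod.mk.injEq]
    constructor
    · rintro ⟨rfl, rfl⟩
      exact ⟨hi, hj, by omega, pvV_src M a b⟩
    · rintro ⟨_, _, hsum, hpv⟩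
      have := pvV_ge hpv
      exact ⟨by omega, by omega⟩
  have hfuel : M.length + (if 0 < M.length then (M.headD []).length else 0) ≤
      0 + (M.length * (if 0 < M.length then (M.headD []).length else 0) + 1) := by
    have key : ∀ a b : Nat, 1 ≤ a → 1 ≤ b → a + b ≤ 0 + (a * b + 1) := by
      intro a b ha hb
      obtain ⟨a', rfl⟩ := Nat.exists_eq_add_of_le ha
      obtain ⟨b', rfl⟩ := Nat.exists_eq_add_of_le hb
      have hmul : (1 + a') * (1 + b') = 1 + a' + b' + a' * b' := by ring
      omega
    exact key _ _ (by omega) (by omega)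
  have hchar := pvBFS_char M i j M.length (if 0 < M.length then (M.headD []).length else 0)
    (M.length * (if 0 < M.length then (M.headD []).length else 0) + 1) 0
    [(i, j)] [(i, j)] (fun a b => hseen a b) hfront hfuel k l
  refine pvContains_eq _ k l _ ?_
  rw [hchar]
  exact ⟨fun h => h.2.2, fun e => ⟨hk, hl, e⟩⟩

-- ===== VERDICT (by name: the statement is the Claim_ definition above) =====
theorem precompute_validity_spec : Claim_equal_precompute_validity := by
  intro M _ _
  unfold Spec_precompute_validity
  rw [A_eval, B_eval]
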